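-- pv_equiv track=rewrite | github.com/MousePotatoDoesStuff/Miniprojects | smaller projects/pairs_to_groups.py | preventChains
-- ===== SOURCE A (Python) =====
-- def preventChains(groups, a):
--     X = [a]
--     a = groups[a]
--     if X[-1] == a:
--         return a
--     X.append(a)
--     a = groups[a]
--     while X[-1] != a:
--         X.append(a)
--         a = groups[a]
--     while X:
--         groups[X.pop()] = a
--     return a
-- ===== SOURCE B (Python) =====
-- def preventChains(groups, a):
--     root = a
--     while groups[root] != root:
--         root = groups[root]
--     while groups[a] != root:
--         nxt = groups[a]
--         groups[a] = root
--         a = nxt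
--     return root
-- ===== Notes on version B (the rewrite author's own statement) =====
-- stated objective: alternative
-- what changed: Replaces A's single walk that pushes every visited node on a stack X and then pops it to repoint, by the textbook two-pass path compression: one pass carrying only `root` to find the fixed point, then a second pass re-walking from `a` to repoint; no stack is maintained. Return-value equivalence is proved; both versions also leave `groups` in the same final state.
import Mathlib
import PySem

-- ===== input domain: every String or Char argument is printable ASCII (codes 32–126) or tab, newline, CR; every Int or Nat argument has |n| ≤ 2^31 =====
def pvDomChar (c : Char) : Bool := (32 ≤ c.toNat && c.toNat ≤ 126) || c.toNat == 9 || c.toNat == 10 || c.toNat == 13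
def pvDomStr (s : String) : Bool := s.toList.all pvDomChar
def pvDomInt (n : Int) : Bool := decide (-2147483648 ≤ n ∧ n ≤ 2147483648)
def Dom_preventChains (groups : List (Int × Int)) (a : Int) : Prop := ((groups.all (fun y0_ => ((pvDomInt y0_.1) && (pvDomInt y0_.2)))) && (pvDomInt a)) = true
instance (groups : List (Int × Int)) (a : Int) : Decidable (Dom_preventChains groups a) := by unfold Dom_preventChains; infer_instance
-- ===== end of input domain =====

-- B is a different decomposition (two-pass union-find path compression, no visited stack); equivalence is about
-- the RETURN value only — both Pythons also mutate `groups` in place (they produce the same final dict).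

-- groups[x]: dict lookup; the default x is only reached where Python raises KeyError (excluded by Pre_)
def pcLookup (groups : List (Int × Int)) (x : Int) : Int :=
  (PySem.Dict.mk groups).getD x x

-- ===== PORT A =====
-- the while loop of A; X is Python's visited stack, kept REVERSED (head = X[-1]); the fuel only
-- makes the recursion total — Pre_ guarantees it is never exhausted.  The final `while X:
-- groups[X.pop()] = a` loop of A only mutates `groups` (unobservable in the return value) and returns a.
def preventChainsLoop (groups : List (Int × Int)) : Nat → List Int → Int → Int
  | 0, _, a => a
  | fuel+1, X, a =>
    if X.headD 0 ≠ a then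
      preventChainsLoop groups fuel (a :: X) (pcLookup groups a)
    else a

def preventChains (groups : List (Int × Int)) (a : Int) : Int :=
  let X : List Int := [a]
  let a1 := pcLookup groups a
  if X.headD 0 = a1 then a1
  else
    let X' := a1 :: X
    let a2 := pcLookup groups a1
    preventChainsLoop groups (groups.length + 1) X' a2

-- ===== PORT B =====
-- first pass of B: walk to the fixed point carrying only `root` (fuel = totality guard only).
-- B's second pass (`while groups[a] != root: …`) only mutates `groups`; the return value is `root`.
def findRootLoop (groups : List (Int × Int)) : Nat → Int → Int
  | 0, root => root
  | fuel+1, root =>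
    if pcLookup groups root ≠ root then
      findRootLoop groups fuel (pcLookup groups root)
    else root

def preventChains_alt (groups : List (Int × Int)) (a : Int) : Int :=
  findRootLoop groups (groups.length + 2) a

-- ===== PRECONDITION & SPEC =====
-- k-th iterate of the dict lookup starting at x (none as soon as a key is missing)
def pcChain? (groups : List (Int × Int)) : Nat → Int → Option Int
  | 0, x => some x
  | k+1, x => ((PySem.Dict.mk groups).get? x).bind (pcChain? groups k)

def pcIsFix (groups : List (Int × Int)) : Option Int → Bool
  | none => false
  | some r => (PySem.Dict.mk groups).get? r == some r

-- Pre_: the lookup chain from `a` stays inside the dict's keys and reaches a self-mapped key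
-- within |groups| steps.  Outside it Python A either raises KeyError or loops forever (a cycle).
def Pre_preventChains (groups : List (Int × Int)) (a : Int) : Prop :=
  ∃ k < groups.length + 1, pcIsFix groups (pcChain? groups k a) = true
instance (groups : List (Int × Int)) (a : Int) : Decidable (Pre_preventChains groups a) := by
  unfold Pre_preventChains; infer_instance

def pvWitness_preventChains : (List (Int × Int)) × Int := ([(1, 2), (2, 2)], 1)

def Spec_preventChains (groups : List (Int × Int)) (a : Int) (out : Int) : Prop := out = preventChains_alt groups a
instance (groups : List (Int × Int)) (a : Int) (out : Int) : Decidable (Spec_preventChains groups a out) := by unfold Spec_preventChains; infer_instance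

-- ===== CLAIM (what is proved, stated in full; the proofs are below) =====
def Claim_equal_preventChains : Prop := ∀ (groups : List (Int × Int)) (a : Int), Dom_preventChains groups a → Pre_preventChains groups a → Spec_preventChains groups a (preventChains groups a)

-- ===== LEMMAS AND PROOFS =====

-- a self-mapped key is a fixed point of the whole chain
theorem pcChain?_of_fix (groups : List (Int × Int)) (r : Int)
    (h : (PySem.Dict.mk groups).get? r = some r) :
    ∀ k, pcChain? groups k r = some r := by
  intro k
  induction k with
  | zero => rfl
  | succ k ih => simp [pcChain?, h, ih]

-- bridge: A's stack loop, entered just after pushing p and reading a = groups[p],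
-- computes exactly B's root loop started at p with one more unit of fuel
theorem loop_bridge (groups : List (Int × Int)) :
    ∀ (fuel : Nat) (X : List Int) (p : Int),
      preventChainsLoop groups fuel (p :: X) (pcLookup groups p) =
        findRootLoop groups (fuel + 1) p := by
  intro fuel
  induction fuel with
  | zero =>
    intro X p
    simp only [preventChainsLoop, findRootLoop]
    by_cases h : pcLookup groups p = p
    · simp [h]
    · rw [if_pos h]
  | succ fuel ih =>
    intro X p
    show preventChainsLoop groups (fuel + 1) (p :: X) (pcLookup groups p) = _
    simp only [preventChainsLoop, findRootLoop, List.headD_cons]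
    by_cases h : pcLookup groups p = p
    · simp [h]
    · rw [if_pos (fun hpl : p = pcLookup groups p => h (Eq.symm hpl)), if_pos h]
      exact ih (p :: X) (pcLookup groups p)

-- with enough fuel, B's root loop reaches the chain's fixed point
theorem findRootLoop_of_chain (groups : List (Int × Int)) :
    ∀ (k : Nat) (x r : Int) (fuel : Nat),
      pcChain? groups k x = some r →
      (PySem.Dict.mk groups).get? r = some r →
      k ≤ fuel →
      findRootLoop groups fuel x = r := by
  intro k
  induction k with
  | zero =>
    intro x r fuel hc hr _
    simp only [pcChain?, Option.some.injEq] at hc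
    subst hc
    have hl : pcLookup groups x = x := by
      simp [pcLookup, PySem.Dict.getD_of_get?_eq_some _ _ hr]
    cases fuel with
    | zero => rfl
    | succ f => simp [findRootLoop, hl]
  | succ k ih =>
    intro x r fuel hc hr hle
    simp only [pcChain?] at hc
    cases hg : (PySem.Dict.mk groups).get? x with
    | none => rw [hg] at hc; simp at hc
    | some v =>
      rw [hg] at hc
      simp only [Option.bind_some] at hc
      have hl : pcLookup groups x = v := by
        simp [pcLookup, PySem.Dict.getD_of_get?_eq_some _ _ hg]
      cases fuel with
      | zero => omega
      | succ f =>
        by_cases hvx : v = x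
        · subst hvx
          have := pcChain?_of_fix groups v hg k
          rw [this] at hc
          cases hc
          simp [findRootLoop, hl]
        · simp only [findRootLoop, hl]
          rw [if_pos hvx]
          exact ih v r f hc hr (by omega)

-- ===== VERDICT (by name: the statement is the Claim_ definition above) =====
theorem preventChains_spec : Claim_equal_preventChains := by
  intro groups a _hdom hpre
  obtain ⟨k, hk, hfix⟩ := hpre
  cases hc : pcChain? groups k a with
  | none => rw [hc] at hfix; simp [pcIsFix] at hfix
  | some r =>
    rw [hc] at hfix
    have hr : (PySem.Dict.mk groups).get? r = some r := by
      simpa [pcIsFix] using hfix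
    unfold Spec_preventChains preventChains preventChains_alt
    simp only [List.headD]
    by_cases ha : a = pcLookup groups a
    · rw [if_pos ha]
      -- A returns groups[a] = a; show B also returns a
      cases hg : (PySem.Dict.mk groups).get? a with
      | none =>
        -- impossible under Pre_: the chain from a must use get? a unless k = 0,
        -- and k = 0 forces get? a = some a
        cases k with
        | zero =>
          simp only [pcChain?, Option.some.injEq] at hc
          subst hc; rw [hg] at hr; cases hr
        | succ k' => simp [pcChain?, hg] at hc
      | some v =>
        have hv : v = a := by
          have h2 : (PySem.Dict.mk groups).getD a a = v :=
            PySem.Dict.getD_of_get?_eq_some _ a hg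
          rw [pcLookup] at ha; omega
        rw [← ha]
        exact (findRootLoop_of_chain groups 0 a a (groups.length + 2) rfl
          (by rw [hg, hv]) (by omega)).symm
    · rw [if_neg ha]
      -- a ≠ groups[a]: get? a must be some (pcLookup ≠ default), and k ≥ 1
      cases hg : (PySem.Dict.mk groups).get? a with
      | none =>
        exfalso
        apply ha
        simp [pcLookup, PySem.Dict.getD_of_get?_eq_none _ _ hg]
      | some v =>
        have hv : pcLookup groups a = v := by
          simp [pcLookup, PySem.Dict.getD_of_get?_eq_some _ _ hg]
        cases k with
        | zero =>
          simp only [pcChain?, Option.some.injEq] at hc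
          subst hc
          rw [hg] at hr
          have : v = a := Option.some.inj hr
          exact absurd (by rw [hv, this]) ha
        | succ k' =>
          simp only [pcChain?, hg, Option.bind_some] at hc
          rw [hv]
          rw [loop_bridge groups (groups.length + 1) [a] v]
          rw [findRootLoop_of_chain groups k' v r (groups.length + 2) hc hr (by omega)]
          rw [findRootLoop_of_chain groups (k' + 1) a r (groups.length + 2)
            (by simp [pcChain?, hg, hc]) hr (by omega)]
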